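-- pv_equiv track=rewrite | github.com/brunocoronado49/python-total-udemy | 05-dia/reducir.py | reducir_lista
-- ===== SOURCE A (Python) =====
-- def reducir_lista(lista):
--     lista_nueva = []
--
--     for num in lista:
--         if num not in lista_nueva:
--             lista_nueva.append(num)
--
--     numero_mayor = max(lista_nueva)
--     lista_nueva.remove(numero_mayor)
--
--     return lista_nueva
-- ===== SOURCE B (Python) =====
-- def reducir_lista(lista):
--     mayor = max(lista)
--     distintos = set(lista)
--     distintos.discard(mayor)
--     return sorted(distintos, key=lista.index)
-- ===== Notes on version B (the rewrite author's own statement) =====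
-- stated objective: alternative
-- what changed: B replaces A's build-deduped-list-then-remove-max (with a quadratic inner membership scan) by set arithmetic plus a sort: it takes set(lista), discards max(lista), and sorts the remaining distinct values by their first-occurrence index, which reconstructs first-appearance order.
import Mathlib
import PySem

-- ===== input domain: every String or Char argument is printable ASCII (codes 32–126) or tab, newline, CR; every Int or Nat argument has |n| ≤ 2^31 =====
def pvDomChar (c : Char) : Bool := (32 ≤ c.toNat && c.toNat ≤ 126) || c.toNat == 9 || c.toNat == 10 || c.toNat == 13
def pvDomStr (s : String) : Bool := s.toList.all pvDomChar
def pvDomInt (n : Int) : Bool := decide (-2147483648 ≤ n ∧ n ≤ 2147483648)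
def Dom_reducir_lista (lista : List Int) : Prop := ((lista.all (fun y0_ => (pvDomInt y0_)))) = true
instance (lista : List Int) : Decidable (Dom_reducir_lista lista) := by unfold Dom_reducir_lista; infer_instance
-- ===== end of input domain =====

-- B replaces A's build-deduped-list-then-remove-max by set arithmetic plus a sort by first-occurrence
-- index (alternative algorithm; equal because first-appearance order is the order of first indices).

-- ===== PORT A =====
def reducir_lista (lista : List Int) : List Int :=
  let lista_nueva :=
    lista.foldl (fun acc num => if num ∈ acc then acc else acc ++ [num]) []
  match PySem.List.max? lista_nueva (fun x => x) with
  | none => []   -- max([]) raises ValueError; excluded by Pre_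
  | some numero_mayor => (PySem.List.remove? lista_nueva numero_mayor).getD lista_nueva

-- ===== PORT B =====
def reducir_lista_alt (lista : List Int) : List Int :=
  match PySem.List.max? lista (fun x => x) with
  | none => []   -- max([]) raises ValueError; excluded by Pre_
  | some mayor =>
    let distintos := PySem.Set.discard (PySem.Set.ofList lista) mayor
    -- key=lista.index: every element of distintos is in lista, so index? is some; getD 0 is unreachable
    PySem.List.sorted distintos (fun x => (PySem.List.index? lista x).getD 0) false

-- ===== PRECONDITION & SPEC =====
-- max([]) raises ValueError in both A and B, so the empty list is excluded.
def Pre_reducir_lista (lista : List Int) : Prop := lista ≠ []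
instance (lista : List Int) : Decidable (Pre_reducir_lista lista) := by unfold Pre_reducir_lista; infer_instance
def pvWitness_reducir_lista : List Int := [3, 1, 2, 3, 1]

def Spec_reducir_lista (lista : List Int) (out : List Int) : Prop := out = reducir_lista_alt lista
instance (lista : List Int) (out : List Int) : Decidable (Spec_reducir_lista lista out) := by unfold Spec_reducir_lista; infer_instance

-- ===== CLAIM (what is proved, stated in full; the proofs are below) =====
def Claim_equal_reducir_lista : Prop := ∀ (lista : List Int), Dom_reducir_lista lista → Pre_reducir_lista lista → Spec_reducir_lista lista (reducir_lista lista)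

-- ===== LEMMAS AND PROOFS =====

-- A's dedup loop is first-occurrence dedup, i.e. PySem.Set.ofList
theorem foldA_eq_ofList (lista : List Int) :
    lista.foldl (fun acc num => if num ∈ acc then acc else acc ++ [num]) []
      = PySem.Set.ofList lista := by
  have hf : (fun (acc : List Int) num => if num ∈ acc then acc else acc ++ [num])
      = PySem.Set.add := by
    funext acc num
    simp [PySem.Set.add, PySem.Set.contains]
  rw [hf, PySem.Set.ofList_eq_foldl]

-- dedup preserves the maximum
theorem max?_ofList (l : List Int) (h : l ≠ []) :
    PySem.List.max? (PySem.Set.ofList l) (fun x => x)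
      = PySem.List.max? l (fun x => x) := by
  rcases e1 : PySem.List.max? (PySem.Set.ofList l) (fun x => x) with _ | m1
  · rw [PySem.List.max?_eq_none_iff] at e1
    cases hl : l with
    | nil => exact absurd hl h
    | cons a t =>
      have ha : a ∈ PySem.Set.ofList l := (PySem.Set.mem_ofList l a).mpr (by simp [hl])
      rw [e1] at ha
      simp at ha
  rcases e2 : PySem.List.max? l (fun x => x) with _ | m2
  · rw [PySem.List.max?_eq_none_iff] at e2
    exact absurd e2 h
  have h1 : m1 ∈ l := (PySem.Set.mem_ofList l m1).mp (PySem.List.max?_mem e1)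
  have h2 : m2 ∈ PySem.Set.ofList l := (PySem.Set.mem_ofList l m2).mpr (PySem.List.max?_mem e2)
  have le1 : m1 ≤ m2 := PySem.List.max?_isMax e2 m1 h1
  have le2 : m2 ≤ m1 := PySem.List.max?_isMax e1 m2 h2
  have : m1 = m2 := le_antisymm le1 le2
  rw [this]

-- a member's first index is defined and below the length
theorem index?_of_mem (l : List Int) (v : Int) (h : v ∈ l) :
    ∃ k, PySem.List.index? l v = some k ∧ k < l.length := by
  rcases e : PySem.List.index? l v with _ | k
  · exact absurd ((PySem.List.index?_eq_none_iff l v).mp e) (by simpa using h)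
  · refine ⟨k, rfl, ?_⟩
    obtain ⟨pre, suf, hl, hk, -⟩ := (PySem.List.index?_eq_some_iff l v k).mp e
    subst hl
    simp [← hk]

-- the deduped list is strictly increasing in first-occurrence index
theorem pairwise_idx (l : List Int) :
    (PySem.Set.ofList l).Pairwise
      (fun a b => (PySem.List.index? l a).getD 0 < (PySem.List.index? l b).getD 0) := by
  induction l using List.reverseRecOn with
  | nil => simp [PySem.Set.ofList]
  | append_singleton t x ih =>
    rw [PySem.Set.ofList_append_singleton]
    have hcongr : ∀ a ∈ PySem.Set.ofList t,
        PySem.List.index? (t ++ [x]) a = PySem.List.index? t a := by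
      intro a ha
      exact PySem.List.index?_append_of_mem [x] ((PySem.Set.mem_ofList t a).mp ha)
    by_cases hx : x ∈ PySem.Set.ofList t
    · have : (PySem.Set.ofList t).add x = PySem.Set.ofList t := by
        simp [PySem.Set.add, PySem.Set.contains, hx]
      rw [this]
      exact ih.imp_of_mem (fun {a b} ha hb hab => by rw [hcongr a ha, hcongr b hb]; exact hab)
    · have hxt : x ∉ t := fun hm => hx ((PySem.Set.mem_ofList t x).mpr hm)
      have : (PySem.Set.ofList t).add x = PySem.Set.ofList t ++ [x] := by
        simp [PySem.Set.add, PySem.Set.contains, hx]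
      rw [this, List.pairwise_append]
      refine ⟨ih.imp_of_mem (fun {a b} ha hb hab => by rw [hcongr a ha, hcongr b hb]; exact hab),
        List.pairwise_singleton _ _, ?_⟩
      intro a ha b hb
      rw [List.mem_singleton] at hb
      rw [hb]
      obtain ⟨k, hk, hklen⟩ := index?_of_mem t a ((PySem.Set.mem_ofList t a).mp ha)
      rw [hcongr a ha, hk, PySem.List.index?_append_singleton_self t x hxt]
      simpa using hklen

-- removing the max: both A's erase (on a nodup list) and B's discard are the same filter
theorem discard_eq_erase (l : List Int) (m : Int) :
    PySem.Set.discard (PySem.Set.ofList l) m = (PySem.Set.ofList l).erase m := by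
  have h := List.Nodup.erase_eq_filter (PySem.Set.nodup_ofList l) m
  rw [h]
  simp [PySem.Set.discard, bne]

-- ===== VERDICT (by name: the statement is the Claim_ definition above) =====
theorem reducir_lista_spec : Claim_equal_reducir_lista := by
  intro lista _ hpre
  obtain ⟨m, e⟩ : ∃ m, PySem.List.max? lista (fun x => x) = some m := by
    rcases h : PySem.List.max? lista (fun x => x) with _ | m
    · exact absurd ((PySem.List.max?_eq_none_iff lista fun x => x).mp h) hpre
    · exact ⟨m, rfl⟩
  unfold Spec_reducir_lista reducir_lista reducir_lista_alt
  simp only [foldA_eq_ofList, max?_ofList lista hpre, e]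
  have hmem : m ∈ PySem.Set.ofList lista :=
    (PySem.Set.mem_ofList lista m).mpr (PySem.List.max?_mem e)
  rw [PySem.List.remove?_eq_some_erase _ m hmem]
  simp only [Option.getD_some]
  refine (PySem.List.sorted_eq_of_perm_of_pairwise_lt _ _ _ ?_ ?_).symm
  · rw [discard_eq_erase]
  · exact (pairwise_idx lista).sublist (List.erase_sublist)
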